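-- pv_equiv track=rewrite | github.com/Ashleshk/LeetCode-Programming-Codes | Python/Goodness.py | getDistinctGoodnessValues
-- ===== SOURCE A (Python) =====
-- def getDistinctGoodnessValues(arr):
--     n = len(arr)
--     dp = [set() for _ in range(n)]
--     all_goodness_values = set()
--
--     for i in range(n):
--         current_val = arr[i]
--         dp[i].add(current_val)
--
--         for j in range(i):
--             if arr[j] < current_val:
--                 for goodness in dp[j]:
--                     dp[i].add(goodness | current_val)
--
--         all_goodness_values.update(dp[i])
--
--     all_goodness_values.add(0)  # include the goodness of the empty subsequence
--
--     return sorted(all_goodness_values)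
-- ===== SOURCE B (Python) =====
-- def getDistinctGoodnessValues(arr):
--     # Layered BFS over the state graph whose nodes are (last index, OR value):
--     # the frontier holds the newly discovered states, `seen` the states already
--     # discovered; each round expands the frontier one step forward, so a state
--     # is expanded at most once.
--     n = len(arr)
--     frontier = {(i, arr[i]) for i in range(n)}
--     seen = set(frontier)
--     result = {0} | {g for _, g in frontier}
--     for _ in range(n):
--         nxt = set()
--         for i, g in frontier:
--             for k in range(i + 1, n):
--                 if arr[k] > arr[i]:
--                     s = (k, g | arr[k])
--                     if s not in seen:
--                         seen.add(s)
--                         nxt.add(s)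
--         frontier = nxt
--         result |= {g for _, g in nxt}
--     return sorted(result)
-- ===== Notes on version B (the rewrite author's own statement) =====
-- stated objective: alternative
-- what changed: A's per-index dynamic programming over arrays of goodness sets is replaced by a layered breadth-first search on the graph of states (last index, OR value): a frontier of newly discovered states is expanded one edge per round, a seen set guarantees each state is expanded at most once, and the OR values are collected as states are discovered.
import Mathlib
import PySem

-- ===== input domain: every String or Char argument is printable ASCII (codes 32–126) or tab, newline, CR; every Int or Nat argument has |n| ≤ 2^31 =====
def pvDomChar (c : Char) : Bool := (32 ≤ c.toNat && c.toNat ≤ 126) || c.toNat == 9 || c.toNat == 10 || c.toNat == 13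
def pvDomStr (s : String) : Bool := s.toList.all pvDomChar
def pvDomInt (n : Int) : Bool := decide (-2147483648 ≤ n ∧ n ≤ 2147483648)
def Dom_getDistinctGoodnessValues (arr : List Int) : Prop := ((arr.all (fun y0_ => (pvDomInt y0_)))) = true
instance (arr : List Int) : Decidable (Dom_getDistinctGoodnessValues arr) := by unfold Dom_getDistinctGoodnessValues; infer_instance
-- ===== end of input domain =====

-- B replaces A's per-index DP over goodness sets by a layered BFS over the graph of
-- states (last index, OR value), with a frontier and a `seen` set so each state is
-- expanded at most once: a different algorithm, not claimed faster.

-- ===== PORT A =====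
-- Literal port of A.  Indices produced by range(n) / range(i) are always in range,
-- so arr[i] / dp[i] are ported with List.getD (exact on those in-range indices).
def getDistinctGoodnessValues (arr : List Int) : List Int :=
  let n := arr.length
  let st := (List.range n).foldl (fun (st : List (PySem.Set Int) × PySem.Set Int) i =>
    let currentVal := arr.getD i 0
    let dp1 := st.1.set i (PySem.Set.add (st.1.getD i []) currentVal)
    let dp2 := (List.range i).foldl (fun dp j =>
      if arr.getD j 0 < currentVal then
        (dp.getD j []).foldl (fun dp' g =>
          dp'.set i (PySem.Set.add (dp'.getD i []) (PySem.Int.bor g currentVal))) dp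
      else dp) dp1
    (dp2, PySem.Set.update st.2 (dp2.getD i [])))
    ((List.range n).map (fun _ => PySem.Set.empty), PySem.Set.empty)
  PySem.List.sorted (PySem.Set.add st.2 0) (fun x => x) false

-- ===== PORT B =====
-- Literal port of B (layered BFS with frontier / seen / result; the loop state is
-- (frontier, seen, result); range(i+1, n) is List.range' (i+1) (n-(i+1))).
-- Iterating the Python set `frontier` is order-insensitive here (it only builds
-- other sets), so the fold over the Set's underlying list is exact.
def getDistinctGoodnessValues_alt (arr : List Int) : List Int :=
  let n := arr.length
  let frontier0 : PySem.Set (Nat × Int) :=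
    PySem.Set.ofList ((List.range n).map (fun i => (i, arr.getD i 0)))
  let seen0 : PySem.Set (Nat × Int) := PySem.Set.ofList frontier0
  let result0 : PySem.Set Int :=
    PySem.Set.union (PySem.Set.ofList [(0 : Int)]) (frontier0.map (fun s => s.2))
  let st := (List.range n).foldl
    (fun (st : PySem.Set (Nat × Int) × PySem.Set (Nat × Int) × PySem.Set Int) _ =>
      let q := st.1.foldl (fun (q : PySem.Set (Nat × Int) × PySem.Set (Nat × Int)) ig =>
        (List.range' (ig.1 + 1) (n - (ig.1 + 1))).foldl (fun q k =>
          if arr.getD k 0 > arr.getD ig.1 0 then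
            let s := (k, PySem.Int.bor ig.2 (arr.getD k 0))
            if PySem.Set.contains q.1 s then q
            else (PySem.Set.add q.1 s, PySem.Set.add q.2 s)
          else q) q) (st.2.1, PySem.Set.empty)
      (q.2, q.1, PySem.Set.update st.2.2 (PySem.Set.ofList (q.2.map (fun s => s.2)))))
    (frontier0, seen0, result0)
  PySem.List.sorted st.2.2 (fun x => x) false

-- ===== PRECONDITION & SPEC =====
def Spec_getDistinctGoodnessValues (arr : List Int) (out : List Int) : Prop := out = getDistinctGoodnessValues_alt arr
instance (arr : List Int) (out : List Int) : Decidable (Spec_getDistinctGoodnessValues arr out) := by unfold Spec_getDistinctGoodnessValues; infer_instance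

-- ===== CLAIM (what is proved, stated in full; the proofs are below) =====
def Claim_equal_getDistinctGoodnessValues : Prop := ∀ (arr : List Int), Dom_getDistinctGoodnessValues arr → Spec_getDistinctGoodnessValues arr (getDistinctGoodnessValues arr)

-- ===== LEMMAS AND PROOFS =====

-- small List.getD-with-set helpers (specific getD/set combinations used by A's port)
theorem pvGetD_set_self {α : Type} : ∀ (l : List α) (i : Nat), i < l.length → ∀ (x d : α), (l.set i x).getD i d = x := by
  intro l
  induction l with
  | nil => intro i h; simp at h
  | cons a t ih =>
    intro i h x d
    cases i with
    | zero => rfl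
    | succ n => exact ih n (by simpa using h) x d

theorem pvGetD_set_ne {α : Type} : ∀ (l : List α) (i j : Nat), i ≠ j → ∀ (x d : α), (l.set i x).getD j d = l.getD j d := by
  intro l
  induction l with
  | nil => intro i j _ x d; rfl
  | cons a t ih =>
    intro i j hne x d
    cases i with
    | zero =>
      cases j with
      | zero => exact absurd rfl hne
      | succ m => rfl
    | succ n =>
      cases j with
      | zero => rfl
      | succ m => exact ih n m (by omega) x d

theorem pvSet_getD_self {α : Type} : ∀ (l : List α) (i : Nat), i < l.length → ∀ (d : α), l.set i (l.getD i d) = l := by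
  intro l
  induction l with
  | nil => intro i h; simp at h
  | cons a t ih =>
    intro i h d
    cases i with
    | zero => rfl
    | succ n => simpa using ih n (by simpa using h) d

theorem pvGetD_map_const {α β : Type} : ∀ (l : List α) (k : Nat) (c : β), (l.map (fun _ => c)).getD k c = c := by
  intro l
  induction l with
  | nil => intro k c; rfl
  | cons a t ih =>
    intro k c
    cases k with
    | zero => rfl
    | succ n => exact ih n c

theorem pvMem_range' : ∀ (n s m : Nat), m ∈ List.range' s n ↔ s ≤ m ∧ m < s + n := by
  intro n
  induction n with
  | zero => intro s m; simp
  | succ n ih =>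
    intro s m
    rw [List.range'_succ, List.mem_cons, ih (s+1) m]
    omega

-- the goodness values reachable by an increasing subsequence ending at index k
inductive G (a : List Int) : Nat → Int → Prop where
  | single : ∀ (k : Nat), G a k (a.getD k 0)
  | extend : ∀ (j k : Nat) (h : Int), j < k → a.getD j 0 < a.getD k 0 → G a j h →
      G a k (PySem.Int.bor h (a.getD k 0))

theorem G_iff (a : List Int) (k : Nat) (g : Int) :
    G a k g ↔ g = a.getD k 0 ∨ ∃ j, j < k ∧ a.getD j 0 < a.getD k 0 ∧
      ∃ h, G a j h ∧ g = PySem.Int.bor h (a.getD k 0) := by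
  constructor
  · intro hg
    cases hg with
    | single k' => exact Or.inl rfl
    | extend j k' h hjk hlt hG => exact Or.inr ⟨j, hjk, hlt, h, hG, rfl⟩
  · rintro (rfl | ⟨j, hjk, hlt, h, hG, rfl⟩)
    · exact G.single k
    · exact G.extend j k h hjk hlt hG

-- the same relation graded by the length of the subsequence (B's BFS layers)
inductive GLn (a : List Int) : Nat → Int → Nat → Prop where
  | single : ∀ (k : Nat), GLn a k (a.getD k 0) 1
  | extend : ∀ (j k : Nat) (h : Int) (l : Nat), j < k → a.getD j 0 < a.getD k 0 → GLn a j h l →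
      GLn a k (PySem.Int.bor h (a.getD k 0)) (l+1)

theorem GLn_len (a : List Int) : ∀ k g l, GLn a k g l → 1 ≤ l ∧ l ≤ k + 1 := by
  intro k g l h
  induction h with
  | single k => omega
  | extend j k h l hjk _ _ ih => omega

theorem G_iff_GLn (a : List Int) (k : Nat) (g : Int) : G a k g ↔ ∃ l, GLn a k g l := by
  constructor
  · intro h
    induction h with
    | single k => exact ⟨1, GLn.single k⟩
    | extend j k h hjk hlt _ ih =>
      obtain ⟨l, hl⟩ := ih
      exact ⟨l+1, GLn.extend j k h l hjk hlt hl⟩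
  · rintro ⟨l, hl⟩
    induction hl with
    | single k => exact G.single k
    | extend j k h l hjk hlt _ ih => exact G.extend j k h hjk hlt ih

theorem GLn_one_aux (a : List Int) : ∀ k g l, GLn a k g l → l = 1 → g = a.getD k 0 := by
  intro k g l h
  induction h with
  | single k => intro _; rfl
  | extend j k h l hjk hlt hGL ih =>
    intro he
    have := GLn_len a j h l hGL
    omega

theorem GLn_one (a : List Int) (k : Nat) (g : Int) : GLn a k g 1 ↔ g = a.getD k 0 := by
  constructor
  · intro h
    exact GLn_one_aux a k g 1 h rfl
  · rintro rfl
    exact GLn.single k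

-- inversion for layers ≥ 2: the last step of the subsequence
theorem GLn_inv (a : List Int) : ∀ k g l, GLn a k g l → 2 ≤ l →
    ∃ j h, j < k ∧ a.getD j 0 < a.getD k 0 ∧ GLn a j h (l-1) ∧ g = PySem.Int.bor h (a.getD k 0) := by
  intro k g l hGL
  induction hGL with
  | single k => intro h2; omega
  | extend j k h l hjk hlt hGL ih =>
    intro _
    exact ⟨j, h, hjk, hlt, by simpa using hGL, rfl⟩

-- ---------- A side ----------
def stepA (a : List Int) (st : List (PySem.Set Int) × PySem.Set Int) (i : Nat) :
    List (PySem.Set Int) × PySem.Set Int :=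
  ((List.range i).foldl (fun dp j =>
      if a.getD j 0 < a.getD i 0 then
        (dp.getD j []).foldl (fun dp' g =>
          dp'.set i (PySem.Set.add (dp'.getD i []) (PySem.Int.bor g (a.getD i 0)))) dp
      else dp) (st.1.set i (PySem.Set.add (st.1.getD i []) (a.getD i 0))),
   PySem.Set.update st.2 (((List.range i).foldl (fun dp j =>
      if a.getD j 0 < a.getD i 0 then
        (dp.getD j []).foldl (fun dp' g =>
          dp'.set i (PySem.Set.add (dp'.getD i []) (PySem.Int.bor g (a.getD i 0)))) dp
      else dp) (st.1.set i (PySem.Set.add (st.1.getD i []) (a.getD i 0)))).getD i []))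

def stA (a : List Int) (t : Nat) : List (PySem.Set Int) × PySem.Set Int :=
  (List.range t).foldl (stepA a)
    ((List.range a.length).map (fun _ => PySem.Set.empty), PySem.Set.empty)

theorem A_eq (a : List Int) : getDistinctGoodnessValues a
    = PySem.List.sorted (PySem.Set.add (stA a a.length).2 0) (fun x => x) false := rfl

theorem stA_succ (a : List Int) (t : Nat) : stA a (t+1) = stepA a (stA a t) t := by
  unfold stA
  rw [List.range_succ, List.foldl_append, List.foldl_cons, List.foldl_nil]

-- innermost loop of A: 'for g in dp[j]: dp[i].add(g | cv)' only rewrites slot i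
theorem foldl_set_add (i : Nat) (cv : Int) :
    ∀ (gs : List Int) (dp : List (PySem.Set Int)), i < dp.length →
      gs.foldl (fun dp' g => dp'.set i (PySem.Set.add (dp'.getD i []) (PySem.Int.bor g cv))) dp
        = dp.set i (gs.foldl (fun s g => PySem.Set.add s (PySem.Int.bor g cv)) (dp.getD i [])) := by
  intro gs
  induction gs with
  | nil =>
    intro dp h
    simp only [List.foldl_nil]
    exact (pvSet_getD_self dp i h []).symm
  | cons g rest ih =>
    intro dp h
    simp only [List.foldl_cons]
    rw [ih (dp.set i (PySem.Set.add (dp.getD i []) (PySem.Int.bor g cv))) (by simpa using h)]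
    rw [List.set_set, pvGetD_set_self dp i h]

-- middle loop of A: the whole j-loop is one update of slot i
theorem foldA_mid (a : List Int) (cv : Int) (i : Nat) :
    ∀ (js : List Nat) (dp : List (PySem.Set Int)), i < dp.length → (∀ j ∈ js, j ≠ i) →
      js.foldl (fun dp j =>
          if a.getD j 0 < cv then
            (dp.getD j []).foldl (fun dp' g =>
              dp'.set i (PySem.Set.add (dp'.getD i []) (PySem.Int.bor g cv))) dp
          else dp) dp
        = dp.set i (js.foldl (fun s j =>
            if a.getD j 0 < cv then
              (dp.getD j []).foldl (fun s g => PySem.Set.add s (PySem.Int.bor g cv)) s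
            else s) (dp.getD i [])) := by
  intro js
  induction js with
  | nil =>
    intro dp h _
    simp only [List.foldl_nil]
    exact (pvSet_getD_self dp i h []).symm
  | cons j rest ih =>
    intro dp h hne
    have hji : j ≠ i := hne j (List.mem_cons_self ..)
    by_cases hc : a.getD j 0 < cv
    · simp only [List.foldl_cons, if_pos hc]
      rw [foldl_set_add i cv (dp.getD j []) dp h]
      rw [ih (dp.set i ((dp.getD j []).foldl (fun s g => PySem.Set.add s (PySem.Int.bor g cv)) (dp.getD i [])))
            (by simpa using h) (fun j' hj' => hne j' (List.mem_cons_of_mem _ hj'))]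
      rw [List.set_set, pvGetD_set_self dp i h]
      congr 1
      apply PySem.List.foldl_congr_mem
      intro s j' hj'
      rw [pvGetD_set_ne dp i j' (fun hh => (hne j' (List.mem_cons_of_mem _ hj')) hh.symm)]
    · simp only [List.foldl_cons, if_neg hc]
      exact ih dp h (fun j' hj' => hne j' (List.mem_cons_of_mem _ hj'))

-- membership in the pure set-level fold of A's j-loop
theorem mem_foldA (a : List Int) (cv : Int) (dpv : Nat → List Int) :
    ∀ (js : List Nat) (s0 : List Int) (g : Int),
      (g ∈ js.foldl (fun s j =>
          if a.getD j 0 < cv then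
            (dpv j).foldl (fun s g' => PySem.Set.add s (PySem.Int.bor g' cv)) s
          else s) s0
        ↔ g ∈ s0 ∨ ∃ j, j ∈ js ∧ a.getD j 0 < cv ∧ ∃ y, y ∈ dpv j ∧ g = PySem.Int.bor y cv) := by
  intro js
  induction js with
  | nil => intro s0 g; simp
  | cons j rest ih =>
    intro s0 g
    simp only [List.foldl_cons]
    by_cases hc : a.getD j 0 < cv
    · rw [if_pos hc, ih]
      have hmf : g ∈ (dpv j).foldl (fun s g' => PySem.Set.add s (PySem.Int.bor g' cv)) s0
          ↔ g ∈ s0 ∨ ∃ b ∈ dpv j, g = PySem.Int.bor b cv :=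
        PySem.Set.mem_foldl_add (dpv j) (fun g' => PySem.Int.bor g' cv) s0 g
      rw [hmf]
      constructor
      · rintro ((h | ⟨y, hy, rfl⟩) | ⟨j', hj', hc', y, hy, rfl⟩)
        · exact Or.inl h
        · exact Or.inr ⟨j, List.mem_cons_self .., hc, y, hy, rfl⟩
        · exact Or.inr ⟨j', List.mem_cons_of_mem _ hj', hc', y, hy, rfl⟩
      · rintro (h | ⟨j', hj', hc', y, hy, rfl⟩)
        · exact Or.inl (Or.inl h)
        · rcases List.mem_cons.mp hj' with rfl | hj''
          · exact Or.inl (Or.inr ⟨y, hy, rfl⟩)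
          · exact Or.inr ⟨j', hj'', hc', y, hy, rfl⟩
    · rw [if_neg hc, ih]
      constructor
      · rintro (h | ⟨j', hj', hc', y, hy, rfl⟩)
        · exact Or.inl h
        · exact Or.inr ⟨j', List.mem_cons_of_mem _ hj', hc', y, hy, rfl⟩
      · rintro (h | ⟨j', hj', hc', y, hy, rfl⟩)
        · exact Or.inl h
        · rcases List.mem_cons.mp hj' with rfl | hj''
          · exact absurd hc' hc
          · exact Or.inr ⟨j', hj'', hc', y, hy, rfl⟩

def SA (a : List Int) (st : List (PySem.Set Int) × PySem.Set Int) (t : Nat) : PySem.Set Int :=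
  (List.range t).foldl (fun s j =>
    if a.getD j 0 < a.getD t 0 then
      (st.1.getD j []).foldl (fun s g => PySem.Set.add s (PySem.Int.bor g (a.getD t 0))) s
    else s) (PySem.Set.add (st.1.getD t []) (a.getD t 0))

theorem stepA_eq (a : List Int) (st : List (PySem.Set Int) × PySem.Set Int) (t : Nat)
    (ht : t < st.1.length) :
    stepA a st t = (st.1.set t (SA a st t), PySem.Set.update st.2 (SA a st t)) := by
  unfold stepA
  have hmid := foldA_mid a (a.getD t 0) t (List.range t)
      (st.1.set t (PySem.Set.add (st.1.getD t []) (a.getD t 0)))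
      (by simpa using ht)
      (fun j hj => by have := List.mem_range.mp hj; omega)
  rw [hmid, List.set_set, pvGetD_set_self st.1 t ht]
  have hreads : (List.range t).foldl (fun s j =>
        if a.getD j 0 < a.getD t 0 then
          ((st.1.set t (PySem.Set.add (st.1.getD t []) (a.getD t 0))).getD j []).foldl
            (fun s g => PySem.Set.add s (PySem.Int.bor g (a.getD t 0))) s
        else s) (PySem.Set.add (st.1.getD t []) (a.getD t 0)) = SA a st t := by
    apply PySem.List.foldl_congr_mem
    intro s j hj
    rw [pvGetD_set_ne st.1 t j (by have := List.mem_range.mp hj; omega)]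
  rw [hreads, pvGetD_set_self st.1 t ht]

theorem invA (a : List Int) : ∀ t, t ≤ a.length →
    (stA a t).1.length = a.length ∧
    (∀ k, t ≤ k → (stA a t).1.getD k [] = []) ∧
    (∀ k, k < t → ∀ g, (g ∈ (stA a t).1.getD k [] ↔ G a k g)) ∧
    (∀ g, g ∈ (stA a t).2 ↔ ∃ k, k < t ∧ G a k g) ∧
    (stA a t).2.Nodup := by
  intro t
  induction t with
  | zero =>
    intro _
    have e : stA a 0 = ((List.range a.length).map (fun _ => PySem.Set.empty), PySem.Set.empty) := rfl
    rw [e]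
    refine ⟨by simp, ?_, ?_, ?_, ?_⟩
    · intro k _; exact pvGetD_map_const (List.range a.length) k PySem.Set.empty
    · intro k hk; omega
    · intro g
      constructor
      · intro hg; simp [PySem.Set.empty] at hg
      · rintro ⟨k, hk, _⟩; omega
    · exact List.nodup_nil
  | succ t ih =>
    intro ht
    have ht' : t ≤ a.length := by omega
    obtain ⟨hlen, hempty, hmem, hall, hnd⟩ := ih ht'
    have htlen : t < (stA a t).1.length := by omega
    have hstep : stA a (t+1) = stepA a (stA a t) t := stA_succ a t
    have heq := stepA_eq a (stA a t) t htlen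
    have hSA : ∀ g, g ∈ SA a (stA a t) t ↔ G a t g := by
      intro g
      have h0 : g ∈ SA a (stA a t) t ↔
          g ∈ PySem.Set.add ((stA a t).1.getD t []) (a.getD t 0) ∨
          ∃ j, j ∈ List.range t ∧ a.getD j 0 < a.getD t 0 ∧
            ∃ y, y ∈ (stA a t).1.getD j [] ∧ g = PySem.Int.bor y (a.getD t 0) :=
        mem_foldA a (a.getD t 0) (fun j => (stA a t).1.getD j []) (List.range t) _ g
      rw [hempty t (le_refl t)] at h0
      have hadd : g ∈ PySem.Set.add ([] : PySem.Set Int) (a.getD t 0) ↔ g = a.getD t 0 := by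
        simp
      rw [G_iff]
      constructor
      · intro hg
        rcases h0.mp hg with h | ⟨j, hj, hlt, y, hy, rfl⟩
        · exact Or.inl (hadd.mp h)
        · have hjt := List.mem_range.mp hj
          exact Or.inr ⟨j, hjt, hlt, y, (hmem j hjt y).mp hy, rfl⟩
      · rintro (rfl | ⟨j, hjt, hlt, y, hGy, rfl⟩)
        · exact h0.mpr (Or.inl (hadd.mpr rfl))
        · exact h0.mpr (Or.inr ⟨j, List.mem_range.mpr hjt, hlt, y, (hmem j hjt y).mpr hGy, rfl⟩)
    rw [hstep, heq]
    refine ⟨by simpa using hlen, ?_, ?_, ?_, ?_⟩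
    · intro k hk
      rw [pvGetD_set_ne (stA a t).1 t k (by omega)]
      exact hempty k (by omega)
    · intro k hk g
      rcases Nat.lt_succ_iff_lt_or_eq.mp hk with hk' | hk'
      · rw [pvGetD_set_ne (stA a t).1 t k (by omega)]
        exact hmem k hk' g
      · rw [hk', pvGetD_set_self (stA a t).1 t htlen]
        exact hSA g
    · intro g
      rw [PySem.Set.mem_update]
      constructor
      · rintro (h | h)
        · obtain ⟨k, hk, hG⟩ := (hall g).mp h
          exact ⟨k, by omega, hG⟩
        · exact ⟨t, by omega, (hSA g).mp h⟩
      · rintro ⟨k, hk, hG⟩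
        rcases Nat.lt_succ_iff_lt_or_eq.mp hk with hk' | rfl
        · exact Or.inl ((hall g).mpr ⟨k, hk', hG⟩)
        · exact Or.inr ((hSA g).mpr hG)
    · exact PySem.Set.nodup_update _ _ hnd

-- ---------- B side ----------

-- "state s is reachable by an increasing subsequence of length at most m"
def RB (a : List Int) (s : Nat × Int) (m : Nat) : Prop :=
  s.1 < a.length ∧ ∃ l, l ≤ m ∧ GLn a s.1 s.2 l

theorem RB_mono (a : List Int) (s : Nat × Int) (m m' : Nat) (h : m ≤ m') (hr : RB a s m) : RB a s m' := by
  obtain ⟨h1, l, hl, hGL⟩ := hr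
  exact ⟨h1, l, by omega, hGL⟩

-- one BFS round of B, and its trajectory
def stepB (a : List Int) (st : PySem.Set (Nat × Int) × PySem.Set (Nat × Int) × PySem.Set Int) :
    PySem.Set (Nat × Int) × PySem.Set (Nat × Int) × PySem.Set Int :=
  let q := st.1.foldl (fun (q : PySem.Set (Nat × Int) × PySem.Set (Nat × Int)) ig =>
    (List.range' (ig.1 + 1) (a.length - (ig.1 + 1))).foldl (fun q k =>
      if a.getD k 0 > a.getD ig.1 0 then
        let s := (k, PySem.Int.bor ig.2 (a.getD k 0))
        if PySem.Set.contains q.1 s then q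
        else (PySem.Set.add q.1 s, PySem.Set.add q.2 s)
      else q) q) (st.2.1, PySem.Set.empty)
  (q.2, q.1, PySem.Set.update st.2.2 (PySem.Set.ofList (q.2.map (fun s => s.2))))

def stB (a : List Int) (t : Nat) : PySem.Set (Nat × Int) × PySem.Set (Nat × Int) × PySem.Set Int :=
  (List.range t).foldl (fun st _ => stepB a st)
    (PySem.Set.ofList ((List.range a.length).map (fun i => (i, a.getD i 0))),
     PySem.Set.ofList (PySem.Set.ofList ((List.range a.length).map (fun i => (i, a.getD i 0)))),
     PySem.Set.union (PySem.Set.ofList [(0 : Int)])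
       ((PySem.Set.ofList ((List.range a.length).map (fun i => (i, a.getD i 0)))).map (fun s => s.2)))

theorem B_eq (a : List Int) : getDistinctGoodnessValues_alt a
    = PySem.List.sorted (stB a a.length).2.2 (fun x => x) false := rfl

theorem stB_succ (a : List Int) (t : Nat) : stB a (t+1) = stepB a (stB a t) := by
  unfold stB
  rw [List.range_succ, List.foldl_append, List.foldl_cons, List.foldl_nil]

-- the inner conditional fold over k is the plain 'discover' fold over the candidate list
def pvDiscover (q : PySem.Set (Nat × Int) × PySem.Set (Nat × Int)) (s : Nat × Int) :
    PySem.Set (Nat × Int) × PySem.Set (Nat × Int) :=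
  if PySem.Set.contains q.1 s then q else (PySem.Set.add q.1 s, PySem.Set.add q.2 s)

def pvCand (a : List Int) (ig : Nat × Int) : List (Nat × Int) :=
  (List.range' (ig.1 + 1) (a.length - (ig.1 + 1))).filterMap (fun k =>
    if a.getD k 0 > a.getD ig.1 0 then some (k, PySem.Int.bor ig.2 (a.getD k 0)) else none)

theorem inner_eq (a : List Int) (ig : Nat × Int) :
    ∀ (ks : List Nat) (q : PySem.Set (Nat × Int) × PySem.Set (Nat × Int)),
      ks.foldl (fun q k =>
        if a.getD k 0 > a.getD ig.1 0 then
          let s := (k, PySem.Int.bor ig.2 (a.getD k 0))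
          if PySem.Set.contains q.1 s then q
          else (PySem.Set.add q.1 s, PySem.Set.add q.2 s)
        else q) q
      = (ks.filterMap (fun k =>
          if a.getD k 0 > a.getD ig.1 0 then some (k, PySem.Int.bor ig.2 (a.getD k 0)) else none)).foldl
          pvDiscover q := by
  intro ks
  induction ks with
  | nil => intro q; rfl
  | cons k rest ih =>
    intro q
    simp only [List.foldl_cons, List.filterMap_cons]
    by_cases hc : a.getD k 0 > a.getD ig.1 0
    · rw [if_pos hc, if_pos hc]
      simp only [List.foldl_cons]
      rw [ih]
      rfl
    · rw [if_neg hc, if_neg hc]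
      exact ih q

theorem outer_eq (a : List Int) :
    ∀ (ps : List (Nat × Int)) (q : PySem.Set (Nat × Int) × PySem.Set (Nat × Int)),
      ps.foldl (fun q ig =>
        (List.range' (ig.1 + 1) (a.length - (ig.1 + 1))).foldl (fun q k =>
          if a.getD k 0 > a.getD ig.1 0 then
            let s := (k, PySem.Int.bor ig.2 (a.getD k 0))
            if PySem.Set.contains q.1 s then q
            else (PySem.Set.add q.1 s, PySem.Set.add q.2 s)
          else q) q) q
      = (ps.flatMap (pvCand a)).foldl pvDiscover q := by
  intro ps
  induction ps with
  | nil => intro q; rfl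
  | cons p rest ih =>
    intro q
    simp only [List.foldl_cons, List.flatMap_cons, List.foldl_append]
    rw [inner_eq a p, ih]
    rfl

-- membership in the discover fold: seen accumulates the candidates, nxt the new ones
theorem mem_discover :
    ∀ (cs : List (Nat × Int)) (q : PySem.Set (Nat × Int) × PySem.Set (Nat × Int)) (x : Nat × Int),
      (x ∈ (cs.foldl pvDiscover q).1 ↔ x ∈ q.1 ∨ x ∈ cs) ∧
      (x ∈ (cs.foldl pvDiscover q).2 ↔ x ∈ q.2 ∨ (x ∈ cs ∧ x ∉ q.1)) := by
  intro cs
  induction cs with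
  | nil => intro q x; simp
  | cons c rest ih =>
    intro q x
    simp only [List.foldl_cons, pvDiscover]
    by_cases hc : PySem.Set.contains q.1 c
    · have hcmem : c ∈ q.1 := (PySem.Set.contains_iff _ _).mp hc
      rw [if_pos hc]
      obtain ⟨h1, h2⟩ := ih q x
      constructor
      · rw [h1, List.mem_cons]
        constructor
        · rintro (h | h)
          · exact Or.inl h
          · exact Or.inr (Or.inr h)
        · rintro (h | rfl | h)
          · exact Or.inl h
          · exact Or.inl hcmem
          · exact Or.inr h
      · rw [h2, List.mem_cons]
        constructor
        · rintro (h | ⟨h, hn⟩)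
          · exact Or.inl h
          · exact Or.inr ⟨Or.inr h, hn⟩
        · rintro (h | ⟨(rfl | h), hn⟩)
          · exact Or.inl h
          · exact absurd hcmem hn
          · exact Or.inr ⟨h, hn⟩
    · have hcmem : c ∉ q.1 := fun h => hc ((PySem.Set.contains_iff _ _).mpr h)
      rw [if_neg hc]
      obtain ⟨h1, h2⟩ := ih (PySem.Set.add q.1 c, PySem.Set.add q.2 c) x
      constructor
      · rw [h1, List.mem_cons]
        simp only [PySem.Set.mem_add]
        constructor
        · rintro ((h | rfl) | h)
          · exact Or.inl h
          · exact Or.inr (Or.inl rfl)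
          · exact Or.inr (Or.inr h)
        · rintro (h | rfl | h)
          · exact Or.inl (Or.inl h)
          · exact Or.inl (Or.inr rfl)
          · exact Or.inr h
      · rw [h2, List.mem_cons]
        simp only [PySem.Set.mem_add]
        constructor
        · rintro ((h | rfl) | ⟨h, hn⟩)
          · exact Or.inl h
          · exact Or.inr ⟨Or.inl rfl, hcmem⟩
          · exact Or.inr ⟨Or.inr h, fun hx => hn (Or.inl hx)⟩
        · rintro (h | ⟨(rfl | h), hn⟩)
          · exact Or.inl (Or.inl h)
          · exact Or.inl (Or.inr rfl)
          · by_cases hxc : x = c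
            · exact Or.inl (Or.inr hxc)
            · exact Or.inr ⟨h, fun hx => (hx.elim hn hxc)⟩
  -- (cases spelled out so both components are characterised simultaneously)

-- membership in the candidate list: exactly the BFS edges out of ps
theorem mem_cand (a : List Int) (ps : List (Nat × Int)) (x : Nat × Int) :
    x ∈ ps.flatMap (pvCand a) ↔ ∃ ig ∈ ps, ∃ k, ig.1 < k ∧ k < a.length ∧
      a.getD k 0 > a.getD ig.1 0 ∧ x = (k, PySem.Int.bor ig.2 (a.getD k 0)) := by
  rw [List.mem_flatMap]
  constructor
  · rintro ⟨ig, hig, hx⟩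
    obtain ⟨k, hk, hsome⟩ := List.mem_filterMap.mp hx
    have hkr := (pvMem_range' _ _ k).mp hk
    by_cases hc : a.getD k 0 > a.getD ig.1 0
    · rw [if_pos hc] at hsome
      exact ⟨ig, hig, k, by omega, by omega, hc, (Option.some_inj.mp hsome).symm⟩
    · rw [if_neg hc] at hsome
      exact absurd hsome (by simp)
  · rintro ⟨ig, hig, k, hik, hkn, hc, rfl⟩
    refine ⟨ig, hig, List.mem_filterMap.mpr ⟨k, ?_, by rw [if_pos hc]⟩⟩
    exact (pvMem_range' _ _ k).mpr ⟨by omega, by omega⟩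

-- B's loop invariant: frontier = newly discovered states, seen = all states with a
-- subsequence of length ≤ t+1, result = their OR values plus 0
theorem invB (a : List Int) : ∀ t,
    (∀ s, s ∈ (stB a t).1 ↔ (RB a s (t+1) ∧ ¬ RB a s t)) ∧
    (∀ s, s ∈ (stB a t).2.1 ↔ RB a s (t+1)) ∧
    (∀ g, g ∈ (stB a t).2.2 ↔ g = 0 ∨ ∃ i, RB a (i, g) (t+1)) ∧
    (stB a t).2.2.Nodup := by
  intro t
  induction t with
  | zero =>
    have hfr : ∀ s : Nat × Int,
        s ∈ PySem.Set.ofList ((List.range a.length).map (fun i => (i, a.getD i 0))) ↔ RB a s 1 := by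
      intro s
      rw [PySem.Set.mem_ofList, List.mem_map]
      constructor
      · rintro ⟨i, hi, rfl⟩
        exact ⟨by simpa using List.mem_range.mp hi, 1, le_refl 1, GLn.single i⟩
      · rintro ⟨h1, l, hl, hGL⟩
        have := GLn_len a s.1 s.2 l hGL
        have hl1 : l = 1 := by omega
        subst hl1
        refine ⟨s.1, List.mem_range.mpr h1, ?_⟩
        have := (GLn_one a s.1 s.2).mp hGL
        rw [← this]
    have hR0 : ∀ s : Nat × Int, ¬ RB a s 0 := by
      rintro s ⟨_, l, hl, hGL⟩
      have := GLn_len a s.1 s.2 l hGL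
      omega
    refine ⟨?_, ?_, ?_, ?_⟩
    · intro s
      have : (stB a 0).1 = PySem.Set.ofList ((List.range a.length).map (fun i => (i, a.getD i 0))) := rfl
      rw [this, hfr s]
      exact ⟨fun h => ⟨h, hR0 s⟩, fun h => h.1⟩
    · intro s
      have : (stB a 0).2.1 = PySem.Set.ofList (PySem.Set.ofList ((List.range a.length).map (fun i => (i, a.getD i 0)))) := rfl
      rw [this, PySem.Set.mem_ofList, hfr s]
    · intro g
      have : (stB a 0).2.2 = PySem.Set.union (PySem.Set.ofList [(0 : Int)])
          ((PySem.Set.ofList ((List.range a.length).map (fun i => (i, a.getD i 0)))).map (fun s => s.2)) := rfl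
      rw [this, PySem.Set.mem_union, PySem.Set.mem_ofList, List.mem_singleton, List.mem_map]
      constructor
      · rintro (rfl | ⟨s, hs, rfl⟩)
        · exact Or.inl rfl
        · exact Or.inr ⟨s.1, (hfr s).mp hs⟩
      · rintro (rfl | ⟨i, hR⟩)
        · exact Or.inl rfl
        · exact Or.inr ⟨(i, g), (hfr (i, g)).mpr hR, rfl⟩
    · exact PySem.Set.nodup_union _ _ (PySem.Set.nodup_ofList _)
  | succ t ih =>
    obtain ⟨hfr, hseen, hres, hnd⟩ := ih
    have hstep : stB a (t+1) = stepB a (stB a t) := stB_succ a t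
    -- the flattened candidate fold of this round
    have hq : ∀ x : Nat × Int,
        (x ∈ (((stB a t).1.flatMap (pvCand a)).foldl pvDiscover ((stB a t).2.1, PySem.Set.empty)).1 ↔
            x ∈ (stB a t).2.1 ∨ x ∈ (stB a t).1.flatMap (pvCand a)) ∧
        (x ∈ (((stB a t).1.flatMap (pvCand a)).foldl pvDiscover ((stB a t).2.1, PySem.Set.empty)).2 ↔
            (x ∈ (stB a t).1.flatMap (pvCand a) ∧ x ∉ (stB a t).2.1)) := by
      intro x
      obtain ⟨h1, h2⟩ := mem_discover ((stB a t).1.flatMap (pvCand a)) ((stB a t).2.1, PySem.Set.empty) x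
      refine ⟨h1, ?_⟩
      rw [h2]
      simp [PySem.Set.empty]
    -- candidates ∧ unseen  ↔  the next BFS layer
    have hcand : ∀ x : Nat × Int,
        (x ∈ (stB a t).1.flatMap (pvCand a) ∧ x ∉ (stB a t).2.1) ↔
          (RB a x (t+2) ∧ ¬ RB a x (t+1)) := by
      intro x
      rw [mem_cand, hseen x]
      constructor
      · rintro ⟨⟨ig, hig, k, hik, hkn, hc, rfl⟩, hns⟩
        obtain ⟨hi1, l, hl, hGL⟩ := ((hfr ig).mp hig).1
        exact ⟨⟨hkn, l+1, by omega, GLn.extend ig.1 k ig.2 l hik hc hGL⟩, hns⟩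
      · rintro ⟨⟨hkn, l, hl, hGL⟩, hns⟩
        refine ⟨?_, hns⟩
        have hlx : l = t + 2 := by
          by_contra hne
          exact hns ⟨hkn, l, by omega, hGL⟩
        subst hlx
        obtain ⟨j, h', hjk, hlt, hGL', hxg⟩ := GLn_inv a x.1 x.2 (t+2) hGL (by omega)
        have hGL'' : GLn a j h' (t+1) := by simpa using hGL'
        have hjfr : (j, h') ∈ (stB a t).1 := by
          rw [hfr (j, h')]
          constructor
          · exact ⟨by omega, t+1, le_refl _, hGL''⟩
          · rintro ⟨_, l2, hl2, hGL2⟩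
            have hx2 := GLn.extend j x.1 h' l2 hjk hlt hGL2
            rw [← hxg] at hx2
            exact hns ⟨hkn, l2+1, by omega, hx2⟩
        refine ⟨(j, h'), hjfr, x.1, hjk, hkn, hlt, ?_⟩
        rw [← hxg]
    refine ⟨?_, ?_, ?_, ?_⟩
    · intro s
      have e : (stB a (t+1)).1 =
          (((stB a t).1.flatMap (pvCand a)).foldl pvDiscover ((stB a t).2.1, PySem.Set.empty)).2 := by
        rw [hstep]
        show (stepB a (stB a t)).1 = _
        unfold stepB
        rw [outer_eq]
      rw [e, (hq s).2, hcand s]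
    · intro s
      have e : (stB a (t+1)).2.1 =
          (((stB a t).1.flatMap (pvCand a)).foldl pvDiscover ((stB a t).2.1, PySem.Set.empty)).1 := by
        rw [hstep]
        show (stepB a (stB a t)).2.1 = _
        unfold stepB
        rw [outer_eq]
      rw [e, (hq s).1, hseen s]
      constructor
      · rintro (h | h)
        · exact RB_mono a s (t+1) (t+2) (by omega) h
        · by_cases hns : RB a s (t+1)
          · exact RB_mono a s (t+1) (t+2) (by omega) hns
          · exact ((hcand s).mp ⟨h, fun hx => hns ((hseen s).mp hx)⟩).1
      · intro h
        by_cases hns : RB a s (t+1)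
        · exact Or.inl hns
        · exact Or.inr (((hcand s).mpr ⟨h, hns⟩).1)
    · intro g
      have e : (stB a (t+1)).2.2 = PySem.Set.update (stB a t).2.2
          (PySem.Set.ofList ((((stB a t).1.flatMap (pvCand a)).foldl pvDiscover
            ((stB a t).2.1, PySem.Set.empty)).2.map (fun s => s.2))) := by
        rw [hstep]
        show (stepB a (stB a t)).2.2 = _
        unfold stepB
        rw [outer_eq]
      rw [e, PySem.Set.mem_update, hres g, PySem.Set.mem_ofList, List.mem_map]
      constructor
      · rintro ((rfl | ⟨i, hR⟩) | ⟨s, hs, rfl⟩)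
        · exact Or.inl rfl
        · exact Or.inr ⟨i, RB_mono a (i, g) (t+1) (t+2) (by omega) hR⟩
        · have := ((hcand s).mp ((hq s).2.mp hs)).1
          exact Or.inr ⟨s.1, this⟩
      · rintro (rfl | ⟨i, hR⟩)
        · exact Or.inl (Or.inl rfl)
        · by_cases hR1 : RB a (i, g) (t+1)
          · exact Or.inl (Or.inr ⟨i, hR1⟩)
          · refine Or.inr ⟨(i, g), (hq (i, g)).2.mpr ((hcand (i, g)).mpr ⟨hR, hR1⟩), rfl⟩
    · have e : (stB a (t+1)).2.2 = PySem.Set.update (stB a t).2.2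
          (PySem.Set.ofList ((((stB a t).1.flatMap (pvCand a)).foldl pvDiscover
            ((stB a t).2.1, PySem.Set.empty)).2.map (fun s => s.2))) := by
        rw [hstep]
        show (stepB a (stB a t)).2.2 = _
        unfold stepB
        rw [outer_eq]
      rw [e]
      exact PySem.Set.nodup_update _ _ hnd

-- ===== VERDICT (by name: the statement is the Claim_ definition above) =====
theorem getDistinctGoodnessValues_spec : Claim_equal_getDistinctGoodnessValues := by
  intro a _
  unfold Spec_getDistinctGoodnessValues
  rw [A_eq, B_eq]
  obtain ⟨_, _, _, hallA, hndA⟩ := invA a a.length (le_refl _)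
  obtain ⟨_, _, hallB, hndB⟩ := invB a a.length
  have hperm : (PySem.Set.add (stA a a.length).2 0).Perm (stB a a.length).2.2 := by
    rw [List.perm_ext_iff_of_nodup (PySem.Set.nodup_add _ _ hndA) hndB]
    intro g
    rw [PySem.Set.mem_add, hallA g, hallB g]
    constructor
    · rintro (⟨k, hk, hG⟩ | rfl)
      · obtain ⟨l, hGL⟩ := (G_iff_GLn a k g).mp hG
        have := GLn_len a k g l hGL
        exact Or.inr ⟨k, hk, l, by omega, hGL⟩
      · exact Or.inl rfl
    · rintro (rfl | ⟨i, hi, l, hl, hGL⟩)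
      · exact Or.inr rfl
      · exact Or.inl ⟨i, hi, (G_iff_GLn a i g).mpr ⟨l, hGL⟩⟩
  exact (PySem.List.sorted_id_eq_sorted_id_iff_perm _ _).mpr hperm
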